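-- pv_equiv track=rewrite | github.com/edarichev/mclib | display/makefont/makelinefont.py | generateMinFontRemap
-- ===== SOURCE A (Python) =====
-- def generateMinFontRemap(minFontData):
--     strSrc = ""
--     i = 1
--     for chCode in minFontData[0]: # char codes
--         strSrc += "0x{:02X}".format(chCode) + ", "
--         if i % 10 == 0:
--             strSrc += "\n"
--         i = i + 1
--     return strSrc
-- ===== SOURCE B (Python) =====
-- def generateMinFontRemap(minFontData):
--     codes = minFontData[0]
--     strSrc = ""
--     for start in range(0, len(codes), 10):
--         chunk = codes[start:start + 10]
--         piece = "".join("0x{:02X}, ".format(c) for c in chunk)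
--         if len(chunk) == 10:
--             piece += "\n"
--         strSrc += piece
--     return strSrc
-- ===== Notes on version B (the rewrite author's own statement) =====
-- stated objective: alternative
-- what changed: Replaces the per-element running counter with an i%10==0 newline test by an outer loop over consecutive 10-element chunks of minFontData[0], joining each chunk's hex pieces and appending a newline only to full chunks.
import Mathlib
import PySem

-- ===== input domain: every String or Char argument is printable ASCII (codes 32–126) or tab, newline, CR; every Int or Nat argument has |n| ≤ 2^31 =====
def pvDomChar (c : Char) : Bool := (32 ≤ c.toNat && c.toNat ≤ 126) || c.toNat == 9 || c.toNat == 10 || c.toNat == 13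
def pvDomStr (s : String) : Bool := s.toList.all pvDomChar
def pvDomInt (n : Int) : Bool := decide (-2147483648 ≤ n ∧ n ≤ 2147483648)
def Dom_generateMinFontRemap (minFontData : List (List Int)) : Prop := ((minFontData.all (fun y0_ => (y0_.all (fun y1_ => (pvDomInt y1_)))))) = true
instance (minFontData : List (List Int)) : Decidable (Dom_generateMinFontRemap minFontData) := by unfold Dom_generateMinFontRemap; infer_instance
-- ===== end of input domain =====

-- B replaces A's per-element i % 10 counter by an outer loop over 10-element chunks (alternative decomposition, same cost).

-- ===== PORT A =====
-- shared by both ports: "0x{:02X}".format(n) ++ ", ", as a char list (exact, incl. negatives: '-' then unpadded hex digits)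
def pvHexDig (d : Nat) : Char := if d < 10 then Char.ofNat (48 + d) else Char.ofNat (55 + d)

def pvHexNat (n : Nat) : List Char :=
  if h : n < 16 then [pvHexDig n]
  else pvHexNat (n / 16) ++ [pvHexDig (n % 16)]
  termination_by n
  decreasing_by exact Nat.div_lt_self (by omega) (by omega)

def pvFmtItem (n : Int) : List Char :=
  if n < 0 then ('0' :: 'x' :: '-' :: pvHexNat (-n).toNat) ++ [',', ' ']
  else
    ('0' :: 'x' :: (let ds := pvHexNat n.toNat; if ds.length < 2 then '0' :: ds else ds)) ++ [',', ' ']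

-- A's loop: strSrc accumulator, counter i starting at 1, newline when i % 10 == 0
def pvLoopA : List Int → List Char → Int → List Char
  | [], s, _ => s
  | c :: cs, s, i =>
    let s1 := s ++ pvFmtItem c
    let s2 := if PySem.Int.mod i 10 == 0 then s1 ++ ['\n'] else s1
    pvLoopA cs s2 (i + 1)

def generateMinFontRemap (minFontData : List (List Int)) : String :=
  match PySem.List.pyGet? minFontData 0 with
  | none => ""  -- IndexError in Python; excluded by Pre_
  | some row => String.ofList (pvLoopA row [] 1)

-- ===== PORT B =====
-- B's "".join over one chunk
def pvJoinChunk (chunk : List Int) : List Char := (chunk.map pvFmtItem).foldl (· ++ ·) []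

-- B's outer loop over range(0, len(codes), 10): one step per 10-element chunk
def pvLoopB (cs : List Int) : List Char :=
  if h : cs = [] then []
  else
    let chunk := cs.take 10
    let piece := pvJoinChunk chunk
    (if chunk.length == 10 then piece ++ ['\n'] else piece) ++ pvLoopB (cs.drop 10)
  termination_by cs.length
  decreasing_by
    have : 0 < cs.length := List.length_pos_iff.mpr h
    simp [List.length_drop]; omega

def generateMinFontRemap_alt (minFontData : List (List Int)) : String :=
  match PySem.List.pyGet? minFontData 0 with
  | none => ""  -- IndexError in Python; excluded by Pre_
  | some row => String.ofList (pvLoopB row)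

-- ===== PRECONDITION & SPEC =====
-- Pre_ excludes only the empty outer list, on which minFontData[0] raises IndexError in both A and B.
def Pre_generateMinFontRemap (minFontData : List (List Int)) : Prop := minFontData ≠ []
instance (minFontData : List (List Int)) : Decidable (Pre_generateMinFontRemap minFontData) := by unfold Pre_generateMinFontRemap; infer_instance

def pvWitness_generateMinFontRemap : List (List Int) := [[65, 66, 193, -5, 0]]

def Spec_generateMinFontRemap (minFontData : List (List Int)) (out : String) : Prop := out = generateMinFontRemap_alt minFontData
instance (minFontData : List (List Int)) (out : String) : Decidable (Spec_generateMinFontRemap minFontData out) := by unfold Spec_generateMinFontRemap; infer_instance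

-- ===== CLAIM (what is proved, stated in full; the proofs are below) =====
def Claim_equal_generateMinFontRemap : Prop := ∀ (minFontData : List (List Int)), Dom_generateMinFontRemap minFontData → Pre_generateMinFontRemap minFontData → Spec_generateMinFontRemap minFontData (generateMinFontRemap minFontData)

-- ===== LEMMAS AND PROOFS =====

-- the counter test i % 10 == 0 at counter 10*i + j, for j in 1..9 resp. j = 10
lemma pvMod_ne_zero (i j : Int) (hi : 0 ≤ i) (hj1 : 1 ≤ j) (hj9 : j ≤ 9) :
    (PySem.Int.mod (10 * i + j) 10 == 0) = false := by
  rw [PySem.Int.mod_eq_emod_of_pos (by omega : (0:Int) < 10)]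
  simp only [beq_eq_false_iff_ne, ne_eq]
  omega

lemma pvMod_eq_zero (i : Int) (hi : 0 ≤ i) :
    (PySem.Int.mod (10 * i + 10) 10 == 0) = true := by
  rw [PySem.Int.mod_eq_emod_of_pos (by omega : (0:Int) < 10)]
  simp only [beq_iff_eq]
  omega

lemma pvJoinChunk_acc (cs : List Int) : ∀ (a : List Char),
    (cs.map pvFmtItem).foldl (· ++ ·) a = a ++ pvJoinChunk cs := by
  induction cs with
  | nil => intro a; simp [pvJoinChunk]
  | cons c cs ih =>
    intro a
    simp only [pvJoinChunk, List.map_cons, List.foldl_cons, List.nil_append]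
    rw [ih (a ++ pvFmtItem c), ih (pvFmtItem c), List.append_assoc]

lemma pvJoinChunk_cons (c : Int) (cs : List Int) :
    pvJoinChunk (c :: cs) = pvFmtItem c ++ pvJoinChunk cs := by
  simp only [pvJoinChunk, List.map_cons, List.foldl_cons, List.nil_append]
  exact pvJoinChunk_acc cs _

-- a full chunk, ending exactly at a multiple of 10 (counter runs 10*i+j .. 10*i+10)
lemma pvLoopA_full_chunk (chunk : List Int) :
    ∀ (rest : List Int) (s : List Char) (i j : Int), 0 ≤ i → 1 ≤ j → j ≤ 10 →
      j + chunk.length = 11 →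
      pvLoopA (chunk ++ rest) s (10 * i + j) =
        pvLoopA rest (s ++ pvJoinChunk chunk ++ ['\n']) (10 * (i + 1) + 1) := by
  induction chunk with
  | nil => intro rest s i j _ _ hj10 hlen; simp at hlen; omega
  | cons c cs ih =>
    intro rest s i j hi hj1 hj10 hlen
    simp only [List.length_cons] at hlen
    by_cases hcs : cs = []
    · subst hcs
      have hj : j = 10 := by simp at hlen; omega
      subst hj
      simp only [List.cons_append, List.nil_append, pvLoopA, pvMod_eq_zero i hi, if_true,
        pvJoinChunk_cons, pvJoinChunk, List.map_nil, List.foldl_nil]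
      have : 10 * i + 10 + 1 = 10 * (i + 1) + 1 := by ring
      rw [this]
      simp [List.append_assoc]
    · have hj9 : j ≤ 9 := by
        have : 1 ≤ cs.length := List.length_pos_iff.mpr hcs
        omega
      simp only [List.cons_append, pvLoopA, pvMod_ne_zero i j hi hj1 hj9, Bool.false_eq_true, if_false]
      have h2 := ih rest (s ++ pvFmtItem c) i (j + 1) hi (by omega) (by omega) (by push_cast; push_cast at hlen; omega)
      rw [show 10 * i + j + 1 = 10 * i + (j + 1) by ring, h2, pvJoinChunk_cons]
      simp [List.append_assoc]

-- a final partial chunk (fewer than 10 remaining positions): no newline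
lemma pvLoopA_partial (chunk : List Int) :
    ∀ (s : List Char) (i j : Int), 0 ≤ i → 1 ≤ j → j + chunk.length ≤ 10 →
      pvLoopA chunk s (10 * i + j) = s ++ pvJoinChunk chunk := by
  induction chunk with
  | nil => intro s i j _ _ _; simp [pvLoopA, pvJoinChunk]
  | cons c cs ih =>
    intro s i j hi hj1 hlen
    simp only [List.length_cons] at hlen
    have hj9 : j ≤ 9 := by omega
    simp only [pvLoopA, pvMod_ne_zero i j hi hj1 hj9, Bool.false_eq_true, if_false]
    have h2 := ih (s ++ pvFmtItem c) i (j + 1) hi (by omega) (by push_cast; push_cast at hlen; omega)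
    rw [show 10 * i + j + 1 = 10 * i + (j + 1) by ring, h2, pvJoinChunk_cons]
    simp [List.append_assoc]

lemma pvLoopA_eq_loopB (n : Nat) : ∀ (cs : List Int), cs.length ≤ n →
    ∀ (s : List Char) (i : Int), 0 ≤ i →
      pvLoopA cs s (10 * i + 1) = s ++ pvLoopB cs := by
  induction n with
  | zero =>
    intro cs hn s i _
    have : cs = [] := List.eq_nil_of_length_eq_zero (by omega)
    subst this
    simp [pvLoopA, pvLoopB]
  | succ n ih =>
    intro cs hn s i hi
    by_cases hcs : cs = []
    · subst hcs; simp [pvLoopA, pvLoopB]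
    · rw [pvLoopB]
      simp only [hcs, dif_neg, not_false_iff]
      by_cases hlen : 10 ≤ cs.length
      · have htake : (cs.take 10).length = 10 := by simp [List.length_take]; omega
        have hsplit : cs = cs.take 10 ++ cs.drop 10 := (List.take_append_drop 10 cs).symm
        rw [htake]
        simp only [beq_self_eq_true, if_true]
        conv_lhs => rw [hsplit]
        rw [pvLoopA_full_chunk (cs.take 10) (cs.drop 10) s i 1 hi (by omega) (by omega)
          (by rw [htake]; norm_num)]
        rw [ih (cs.drop 10) (by simp [List.length_drop]; omega) _ (i + 1) (by omega)]
        simp [List.append_assoc]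
      · have htake : cs.take 10 = cs := List.take_of_length_le (by omega)
        have hdrop : cs.drop 10 = [] := List.drop_eq_nil_of_le (by omega)
        rw [htake, hdrop]
        have hne : (cs.length == 10) = false := by simp; omega
        rw [hne]
        simp only [Bool.false_eq_true, if_false]
        rw [pvLoopA_partial cs s i 1 hi (by omega) (by omega)]
        have hB : pvLoopB ([] : List Int) = [] := by rw [pvLoopB]; simp
        rw [hB]
        simp

-- ===== VERDICT (by name: the statement is the Claim_ definition above) =====
theorem generateMinFontRemap_spec : Claim_equal_generateMinFontRemap := by
  intro md _ hpre
  match md with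
  | [] => exact absurd rfl hpre
  | r :: t =>
    have h := pvLoopA_eq_loopB r.length r (le_refl _) [] 0 (le_refl _)
    norm_num at h
    unfold Spec_generateMinFontRemap
    simp only [generateMinFontRemap, generateMinFontRemap_alt, PySem.List.pyGet?_zero_cons, h]
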